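-- pv_equiv track=rewrite | github.com/MdAbedin/binarysearch | 0841 Equalize Even and Odd Index Sums.py | solve
-- ===== SOURCE A (Python) =====
-- def solve(nums):
--     L = [[0,0]]
--
--     for i in range(len(nums)):
--         if i%2 == 0:
--             L.append([L[-1][0]+nums[i], L[-1][1]])
--         else:
--             L.append([L[-1][0], L[-1][1]+nums[i]])
--
--     R = [[0,0]]
--
--     for i in range(len(nums)-1,-1,-1):
--         if i%2 == 0:
--             R.append([R[-1][0]+nums[i], R[-1][1]])
--         else:
--             R.append([R[-1][0], R[-1][1]+nums[i]])
--
--     R.reverse()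
--
--     return sum(L[i][0]+R[i+1][1]==L[i][1]+R[i+1][0] for i in range(len(nums)))
-- ===== SOURCE B (Python) =====
-- def solve(nums):
--     # Algebraic reduction: removing index i keeps sums equal iff
--     # 2*d + s*x == T, where d is the alternating (+,-,+,...) sum of nums[:i],
--     # s the sign (+1/-1) at position i, and T the alternating sum of all of nums.
--     # No parity branches, no even/odd pair states, one scalar accumulator.
--     T = 0
--     s = 1
--     for x in nums:
--         T += s * x
--         s = -s
--     d = 0
--     s = 1
--     count = 0
--     for x in nums:
--         if 2 * d + s * x == T:
--             count += 1
--         d += s * x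
--         s = -s
--     return count
-- ===== Notes on version B (the rewrite author's own statement) =====
-- stated objective: simpler
-- what changed: B replaces A's even/odd prefix- and suffix-sum pair arrays (plus reverse and indexing pass) by an algebraic reduction: the balance test at index i is shown equivalent to the single linear equation 2*d + s*x == T over the alternating-sign cumulative sum d, its sign s and the total alternating sum T, so B keeps one scalar accumulator and no parity case split. The scalar accumulator and absence of list appends/reversal also make B measurably faster by a constant factor.
import Mathlib
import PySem

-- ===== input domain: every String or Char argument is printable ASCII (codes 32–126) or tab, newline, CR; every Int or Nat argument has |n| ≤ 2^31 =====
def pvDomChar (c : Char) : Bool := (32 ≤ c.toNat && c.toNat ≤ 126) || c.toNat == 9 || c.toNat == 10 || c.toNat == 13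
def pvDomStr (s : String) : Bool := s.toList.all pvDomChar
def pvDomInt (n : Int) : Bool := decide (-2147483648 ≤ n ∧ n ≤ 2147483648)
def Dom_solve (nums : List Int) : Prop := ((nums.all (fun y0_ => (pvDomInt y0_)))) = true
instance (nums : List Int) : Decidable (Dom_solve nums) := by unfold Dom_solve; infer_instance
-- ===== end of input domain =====

-- B replaces A's even/odd prefix- and suffix-sum pair arrays by an algebraic
-- reduction of the balance test to one linear equation over the alternating-sign
-- cumulative sum; objective: simpler (scalar state, no parity case split).

-- ===== PORT A =====
-- the loop body shared by A's two array-building loops (identical code in both)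
def stepA (nums : List Int) (L : List (Int × Int)) (i : Int) : List (Int × Int) :=
  if i % 2 == 0 then
    L ++ [((PySem.List.pyGetD L (-1) (0, 0)).1 + PySem.List.pyGetD nums i 0,
           (PySem.List.pyGetD L (-1) (0, 0)).2)]
  else
    L ++ [((PySem.List.pyGetD L (-1) (0, 0)).1,
           (PySem.List.pyGetD L (-1) (0, 0)).2 + PySem.List.pyGetD nums i 0)]

-- one term of A's final generator-sum
def stepC (L R : List (Int × Int)) (acc : Int) (i : Int) : Int :=
  acc + (if (PySem.List.pyGetD L i (0, 0)).1 + (PySem.List.pyGetD R (i + 1) (0, 0)).2 ==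
            (PySem.List.pyGetD L i (0, 0)).2 + (PySem.List.pyGetD R (i + 1) (0, 0)).1
         then 1 else 0)

def solve (nums : List Int) : Int :=
  let n : Int := nums.length
  let L : List (Int × Int) := (PySem.List.pyRange 0 n 1).foldl (stepA nums) [(0, 0)]
  let R : List (Int × Int) :=
    (PySem.List.pyRange (n - 1) (-1) (-1)).foldl (stepA nums) [(0, 0)]
  let R := R.reverse
  (PySem.List.pyRange 0 n 1).foldl (stepC L R) 0

-- ===== PORT B =====
-- body of B's first loop: state (T, s)
def stepT (p : Int × Int) (x : Int) : Int × Int := (p.1 + p.2 * x, -p.2)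

-- body of B's counting loop with total T fixed: state (d, s, count)
def stepB (T : Int) (st : Int × Int × Int) (x : Int) : Int × Int × Int :=
  let d := st.1; let s := st.2.1; let c := st.2.2
  let c := if 2 * d + s * x == T then c + 1 else c
  (d + s * x, -s, c)

def solve_alt (nums : List Int) : Int :=
  let t : Int × Int := nums.foldl stepT (0, 1)
  let r : Int × Int × Int := nums.foldl (stepB t.1) (0, 1, 0)
  r.2.2

-- ===== PRECONDITION & SPEC =====
def Spec_solve (nums : List Int) (out : Int) : Prop := out = solve_alt nums
instance (nums : List Int) (out : Int) : Decidable (Spec_solve nums out) := by unfold Spec_solve; infer_instance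

-- ===== CLAIM (what is proved, stated in full; the proofs are below) =====
def Claim_equal_solve : Prop := ∀ (nums : List Int), Dom_solve nums → Spec_solve nums (solve nums)

-- ===== LEMMAS AND PROOFS =====

-- prefix sums by original index parity: pfx nums k = (Σ nums[j], j<k even, Σ nums[j], j<k odd)
def pfx (nums : List Int) : Nat → Int × Int
  | 0 => (0, 0)
  | k + 1 =>
    if k % 2 = 0 then ((pfx nums k).1 + nums.getD k 0, (pfx nums k).2)
    else ((pfx nums k).1, (pfx nums k).2 + nums.getD k 0)

-- suffix sums by parity, as totals minus prefix
def sfx (nums : List Int) (k : Nat) : Int × Int :=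
  ((pfx nums nums.length).1 - (pfx nums k).1, (pfx nums nums.length).2 - (pfx nums k).2)

def condA (nums : List Int) (k : Nat) : Bool :=
  (pfx nums k).1 + (sfx nums (k + 1)).2 == (pfx nums k).2 + (sfx nums (k + 1)).1

def cnt (nums : List Int) : Nat → Int
  | 0 => 0
  | k + 1 => cnt nums k + (if condA nums k then 1 else 0)

theorem parity_cast (m : Nat) : (((m : Int) % 2 == 0)) = ((m % 2 == 0)) := by
  rcases Nat.mod_two_eq_zero_or_one m with h | h <;> simp [h, beq_iff_eq] <;> omega

theorem stepA_pp (nums : List Int) (m : Nat) :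
    stepA nums ((List.range (m + 1)).map (pfx nums)) (m : Int) =
      (List.range (m + 2)).map (pfx nums) := by
  have hlast : PySem.List.pyGetD ((List.range (m + 1)).map (pfx nums)) (-1) ((0 : Int), (0 : Int)) = pfx nums m := by
    rw [List.range_succ, List.map_append, List.map_singleton]
    exact PySem.List.pyGetD_neg_one_append_singleton _ _ _
  unfold stepA
  rw [parity_cast, hlast, PySem.List.pyGetD_natCast]
  by_cases h : m % 2 = 0 <;>
    simp [h, List.range_succ (n := m + 1), pfx]

theorem ppL (nums : List Int) (m : Nat) :
    (PySem.List.pyRange 0 (m : Int) 1).foldl (stepA nums) [(0, 0)] =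
      (List.range (m + 1)).map (pfx nums) := by
  induction m with
  | zero =>
    rw [PySem.List.pyRange_one_eq_nil (by omega)]
    simp [pfx]
  | succ m ih =>
    have h1 : PySem.List.pyRange 0 ((m + 1 : Nat) : Int) 1 =
        PySem.List.pyRange 0 (m : Int) 1 ++ [(m : Int)] := by
      push_cast
      exact PySem.List.pyRange_one_succ_right (by positivity)
    rw [h1, List.foldl_append, ih]
    simpa using stepA_pp nums m

theorem stepA_sq (nums : List Int) (m : Nat) (hm : m + 1 ≤ nums.length) :
    stepA nums ((List.range (nums.length - m)).map (fun k => sfx nums (nums.length - k))) (m : Int) =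
      (List.range (nums.length - m + 1)).map (fun k => sfx nums (nums.length - k)) := by
  have e : nums.length - m = (nums.length - m - 1) + 1 := by omega
  have hlast : PySem.List.pyGetD
      ((List.range (nums.length - m)).map (fun k => sfx nums (nums.length - k))) (-1)
      ((0 : Int), (0 : Int)) = sfx nums (m + 1) := by
    rw [e, List.range_succ, List.map_append, List.map_singleton]
    rw [PySem.List.pyGetD_neg_one_append_singleton]
    congr 1
    omega
  unfold stepA
  rw [parity_cast, hlast, PySem.List.pyGetD_natCast]
  have hidx : nums.length - (nums.length - m) = m := by omega
  have hr : (List.range (nums.length - m + 1)).map (fun k => sfx nums (nums.length - k)) =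
      (List.range (nums.length - m)).map (fun k => sfx nums (nums.length - k)) ++ [sfx nums m] := by
    rw [List.range_succ, List.map_append, List.map_singleton, hidx]
  rw [hr]
  by_cases h : m % 2 = 0 <;>
    simp [h, sfx, pfx, Prod.ext_iff] <;> ring

theorem RfoldL (nums : List Int) (m : Nat) (hm : m ≤ nums.length) :
    (PySem.List.pyRange ((m : Int) - 1) (-1) (-1)).foldl (stepA nums)
        ((List.range (nums.length - m + 1)).map (fun k => sfx nums (nums.length - k))) =
      (List.range (nums.length + 1)).map (fun k => sfx nums (nums.length - k)) := by
  induction m with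
  | zero =>
    rw [PySem.List.pyRange_neg_one_eq_nil (by omega)]
    simp
  | succ m ih =>
    have h0 : ((m + 1 : Nat) : Int) - 1 = (m : Int) := by push_cast; ring
    rw [h0, show PySem.List.pyRange ((m : Int)) (-1) (-1) =
        (m : Int) :: PySem.List.pyRange ((m : Int) - 1) (-1) (-1) from
      PySem.List.pyRange_neg_one_cons (by omega), List.foldl_cons]
    have e : nums.length - (m + 1) + 1 = nums.length - m := by omega
    rw [e, stepA_sq nums m hm]
    exact ih (by omega)

theorem revMap {α : Type} (g : Nat → α) (N : Nat) :
    ((List.range (N + 1)).map (fun k => g (N - k))).reverse = (List.range (N + 1)).map g := by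
  apply List.ext_getElem (by simp)
  intro i h1 h2
  have hN : i < N + 1 := by simpa using h2
  simp only [List.getElem_reverse, List.getElem_map, List.getElem_range,
    List.length_map, List.length_range]
  congr 1
  omega

theorem getD_mr {α : Type} (g : Nat → α) (N i : Nat) (h : i < N) (d : α) :
    ((List.range N).map g).getD i d = g i := by
  rw [List.getD_eq_getElem?_getD, List.getElem?_eq_getElem (by simpa using h)]
  simp

theorem sumFoldL (nums : List Int) (m : Nat) (hm : m ≤ nums.length) :
    (PySem.List.pyRange 0 (m : Int) 1).foldl
        (stepC ((List.range (nums.length + 1)).map (pfx nums))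
               ((List.range (nums.length + 1)).map (sfx nums))) 0 = cnt nums m := by
  induction m with
  | zero =>
    rw [PySem.List.pyRange_one_eq_nil (by omega)]
    simp [cnt]
  | succ m ih =>
    have h1 : PySem.List.pyRange 0 ((m + 1 : Nat) : Int) 1 =
        PySem.List.pyRange 0 (m : Int) 1 ++ [(m : Int)] := by
      push_cast
      exact PySem.List.pyRange_one_succ_right (by positivity)
    rw [h1, List.foldl_append, ih (by omega)]
    have hcast : ((m : Int) + 1) = ((m + 1 : Nat) : Int) := by push_cast; ring
    simp only [List.foldl_cons, List.foldl_nil]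
    unfold stepC
    rw [hcast, PySem.List.pyGetD_natCast, PySem.List.pyGetD_natCast]
    rw [getD_mr _ _ _ (by omega), getD_mr _ _ _ (by omega)]
    simp [cnt, condA]

theorem A_eq (nums : List Int) : solve nums = cnt nums nums.length := by
  have hinit : ([((0 : Int), (0 : Int))]) =
      (List.range (nums.length - nums.length + 1)).map (fun k => sfx nums (nums.length - k)) := by
    simp [sfx]
  simp only [solve]
  rw [ppL nums nums.length, hinit, RfoldL nums nums.length le_rfl,
    revMap (sfx nums) nums.length, sumFoldL nums nums.length le_rfl]

-- B-side abstractions: alternating-sign prefix sum and the sign at position k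
def altp (nums : List Int) (k : Nat) : Int := (pfx nums k).1 - (pfx nums k).2

def sgn (k : Nat) : Int := if k % 2 = 0 then 1 else -1

theorem Tfold (nums : List Int) (j : Nat) :
    ∀ k, k + j = nums.length →
      (nums.drop k).foldl stepT (altp nums k, sgn k) =
        (altp nums nums.length, sgn nums.length) := by
  induction j with
  | zero =>
    intro k hk
    have : k = nums.length := by omega
    subst this
    simp [List.drop_length]
  | succ j ih =>
    intro k hk
    have hk' : k < nums.length := by omega
    rw [List.drop_eq_getElem_cons hk', List.foldl_cons]
    have hstep : stepT (altp nums k, sgn k) nums[k] = (altp nums (k + 1), sgn (k + 1)) := by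
      unfold stepT altp sgn
      by_cases h : k % 2 = 0
      · have h1 : (k + 1) % 2 = 1 := by omega
        simp [pfx, h, h1, List.getD, List.getElem?_eq_getElem hk']
        ring
      · have h1 : (k + 1) % 2 = 0 := by omega
        simp [pfx, h, h1, List.getD, List.getElem?_eq_getElem hk']
        ring
    rw [hstep]
    exact ih (k + 1) (by omega)

theorem cond_equiv (nums : List Int) (k : Nat) (hk : k < nums.length) :
    (2 * altp nums k + sgn k * nums[k] == altp nums nums.length) = condA nums k := by
  unfold altp sgn condA sfx
  rw [Bool.eq_iff_iff]
  simp only [beq_iff_eq]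
  by_cases h : k % 2 = 0 <;>
    simp only [h, if_true, if_false, pfx, List.getD, List.getElem?_eq_getElem hk,
      Option.getD_some] <;>
    constructor <;> intro hh <;> simp at hh ⊢ <;> linarith

theorem Bfold (nums : List Int) (j : Nat) :
    ∀ k, k + j = nums.length →
      (nums.drop k).foldl (stepB (altp nums nums.length))
          (altp nums k, sgn k, cnt nums k) =
        (altp nums nums.length, sgn nums.length, cnt nums nums.length) := by
  induction j with
  | zero =>
    intro k hk
    have : k = nums.length := by omega
    subst this
    simp [List.drop_length]
  | succ j ih =>
    intro k hk
    have hk' : k < nums.length := by omega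
    rw [List.drop_eq_getElem_cons hk', List.foldl_cons]
    have hstep : stepB (altp nums nums.length) (altp nums k, sgn k, cnt nums k) nums[k] =
        (altp nums (k + 1), sgn (k + 1), cnt nums (k + 1)) := by
      unfold stepB
      dsimp only
      rw [cond_equiv nums k hk']
      have hd : altp nums k + sgn k * nums[k] = altp nums (k + 1) := by
        unfold altp sgn
        by_cases h : k % 2 = 0 <;>
          simp [pfx, h, List.getD, List.getElem?_eq_getElem hk'] <;> ring
      have hs : -sgn k = sgn (k + 1) := by
        unfold sgn
        by_cases h : k % 2 = 0
        · have h1 : (k + 1) % 2 = 1 := by omega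
          simp [h, h1]
        · have h1 : (k + 1) % 2 = 0 := by omega
          simp [h, h1]
      rw [hd, hs]
      by_cases hc : condA nums k = true <;> simp [hc, cnt]
    rw [hstep]
    exact ih (k + 1) (by omega)

theorem B_eq (nums : List Int) : solve_alt nums = cnt nums nums.length := by
  simp only [solve_alt]
  have ht := Tfold nums nums.length 0 (by omega)
  have hb := Bfold nums nums.length 0 (by omega)
  simp only [List.drop_zero] at ht hb
  have e0 : altp nums 0 = 0 := by simp [altp, pfx]
  have es : sgn 0 = 1 := by simp [sgn]
  have ec : cnt nums 0 = 0 := rfl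
  rw [e0, es] at ht
  rw [e0, es, ec] at hb
  rw [ht, hb]

-- ===== VERDICT (by name: the statement is the Claim_ definition above) =====
theorem solve_spec : Claim_equal_solve := by
  intro nums _
  unfold Spec_solve
  rw [A_eq, B_eq]
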